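-- pv_equiv track=rewrite | github.com/riqie/exerc-cios | Introdução a Programação/Lista 10/ex15-henrique.py | verifica_todas_listas
-- ===== SOURCE A (Python) =====
-- def verifica_positivos_negativos(lista):
--     positivos = 0
--     negativos = 0
--
--     for x in lista:
--         if x > 0:
--             positivos += 1
--         elif x < 0:
--             negativos += 1
--
--     return positivos == negativos
--
-- def verifica_todas_listas(w):
--     if not w:
--         return True
--
--     primeira_lista = w[0]
--     resto_listas = w[1:]
--
--     if not verifica_positivos_negativos(primeira_lista):
--         return False
--
--     return verifica_todas_listas(resto_listas)
-- ===== SOURCE B (Python) =====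
-- def _balance(lista):
--     saldo = 0
--     for x in lista:
--         if x > 0:
--             saldo += 1
--         elif x < 0:
--             saldo -= 1
--     return saldo
--
-- def verifica_todas_listas(w):
--     return all(_balance(sub) == 0 for sub in w)
-- ===== Notes on version B (the rewrite author's own statement) =====
-- stated objective: simpler
-- what changed: Replaced the two-counter helper plus recursion-with-slicing by a single running balance (+1/-1 per sign, checked against 0) and a flat all() pass over the sublists.
import Mathlib
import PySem

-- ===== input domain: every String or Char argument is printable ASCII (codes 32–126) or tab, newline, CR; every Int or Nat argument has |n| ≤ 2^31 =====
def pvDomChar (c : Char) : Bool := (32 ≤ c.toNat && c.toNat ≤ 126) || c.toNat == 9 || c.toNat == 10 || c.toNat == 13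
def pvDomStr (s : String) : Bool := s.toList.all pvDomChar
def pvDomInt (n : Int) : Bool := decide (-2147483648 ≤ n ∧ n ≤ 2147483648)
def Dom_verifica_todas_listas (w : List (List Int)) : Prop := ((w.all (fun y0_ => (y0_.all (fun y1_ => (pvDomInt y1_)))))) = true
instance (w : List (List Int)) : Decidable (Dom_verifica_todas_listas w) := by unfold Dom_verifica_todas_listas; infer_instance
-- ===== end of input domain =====

-- B replaces the two-counter helper + recursion-with-slicing by a running sign balance checked against 0 and a flat `all` pass (simpler; same cost).
-- ===== PORT A =====
def verifica_positivos_negativos (lista : List Int) : Bool :=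
  let r := lista.foldl (fun (pn : Int × Int) x =>
    if x > 0 then (pn.1 + 1, pn.2) else if x < 0 then (pn.1, pn.2 + 1) else pn) (0, 0)
  r.1 == r.2

def verifica_todas_listas (w : List (List Int)) : Bool :=
  match w with
  | [] => true
  | primeira_lista :: resto_listas =>
    if !verifica_positivos_negativos primeira_lista then false
    else verifica_todas_listas resto_listas

-- ===== PORT B =====
def balanceB (lista : List Int) : Int :=
  lista.foldl (fun saldo x => if x > 0 then saldo + 1 else if x < 0 then saldo - 1 else saldo) 0

def verifica_todas_listas_alt (w : List (List Int)) : Bool :=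
  w.all (fun sub => balanceB sub == 0)

-- ===== PRECONDITION & SPEC =====
def Spec_verifica_todas_listas (w : List (List Int)) (out : Bool) : Prop := out = verifica_todas_listas_alt w
instance (w : List (List Int)) (out : Bool) : Decidable (Spec_verifica_todas_listas w out) := by unfold Spec_verifica_todas_listas; infer_instance

-- ===== CLAIM (what is proved, stated in full; the proofs are below) =====
def Claim_equal_verifica_todas_listas : Prop := ∀ (w : List (List Int)), Dom_verifica_todas_listas w → Spec_verifica_todas_listas w (verifica_todas_listas w)

-- ===== LEMMAS AND PROOFS =====

-- ===== VERDICT (by name: the statement is the Claim_ definition above) =====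
def pvCF (t : List Int) (p n : Int) : Int × Int :=
  t.foldl (fun (pn : Int × Int) x =>
    if x > 0 then (pn.1 + 1, pn.2) else if x < 0 then (pn.1, pn.2 + 1) else pn) (p, n)

def pvBF (t : List Int) (s : Int) : Int :=
  t.foldl (fun saldo x => if x > 0 then saldo + 1 else if x < 0 then saldo - 1 else saldo) s

theorem pvCF_cons (x : Int) (t : List Int) (p n : Int) :
    pvCF (x :: t) p n =
      if x > 0 then pvCF t (p + 1) n else if x < 0 then pvCF t p (n + 1) else pvCF t p n := by
  simp only [pvCF, List.foldl_cons]; split_ifs <;> rfl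

theorem pvBF_cons (x : Int) (t : List Int) (s : Int) :
    pvBF (x :: t) s =
      if x > 0 then pvBF t (s + 1) else if x < 0 then pvBF t (s - 1) else pvBF t s := by
  simp only [pvBF, List.foldl_cons]; split_ifs <;> rfl

theorem pvCF_shift (t : List Int) : ∀ p n : Int,
    pvCF t p n = (p + (pvCF t 0 0).1, n + (pvCF t 0 0).2) := by
  induction t with
  | nil => intro p n; simp [pvCF]
  | cons x t ih =>
    intro p n
    rw [pvCF_cons, pvCF_cons]
    split_ifs with h1 h2
    · rw [ih (p + 1) n, ih (0 + 1) 0]; simp [Prod.ext_iff]; ring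
    · rw [ih p (n + 1), ih 0 (0 + 1)]; simp [Prod.ext_iff]; ring
    · exact ih p n

theorem pvBF_shift (t : List Int) : ∀ s : Int, pvBF t s = s + pvBF t 0 := by
  induction t with
  | nil => intro s; simp [pvBF]
  | cons x t ih =>
    intro s
    rw [pvBF_cons, pvBF_cons]
    split_ifs with h1 h2
    · rw [ih (s + 1), ih (0 + 1)]; ring
    · rw [ih (s - 1), ih (0 - 1)]; ring
    · exact ih s

theorem pvBF_eq_CF (t : List Int) : pvBF t 0 = (pvCF t 0 0).1 - (pvCF t 0 0).2 := by
  induction t with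
  | nil => simp [pvBF, pvCF]
  | cons x t ih =>
    rw [pvBF_cons, pvCF_cons]
    split_ifs with h1 h2
    · rw [pvBF_shift t (0 + 1), ih, pvCF_shift t (0 + 1) 0]; ring
    · rw [pvBF_shift t (0 - 1), ih, pvCF_shift t 0 (0 + 1)]; ring
    · exact ih

theorem pv_helper_eq (l : List Int) :
    verifica_positivos_negativos l = (balanceB l == 0) := by
  show ((pvCF l 0 0).1 == (pvCF l 0 0).2) = (pvBF l 0 == 0)
  rw [pvBF_eq_CF]
  simp
  omega

theorem pv_outer (w : List (List Int)) :
    verifica_todas_listas w = verifica_todas_listas_alt w := by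
  induction w with
  | nil => rfl
  | cons h t ih =>
    rw [verifica_todas_listas, verifica_todas_listas_alt, List.all_cons, pv_helper_eq]
    cases hb : (balanceB h == 0) with
    | false => simp
    | true => simp; rw [ih]; rfl

theorem verifica_todas_listas_spec : Claim_equal_verifica_todas_listas := by
  intro w _
  exact pv_outer w
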